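-- pv_equiv track=rewrite | github.com/ydb-platform/ydb | contrib/python/fakeredis/py3/fakeredis/commands_mixins/sortedset_mixin.py | _limit_items
-- ===== SOURCE A (Python) =====
-- from typing import Union, Optional, List, Tuple, Callable, Any, Dict
--
-- def _limit_items(items: List[bytes], offset: int, count: int) -> List[bytes]:
--     out: List[bytes] = []
--     for item in items:
--         if offset:  # Note: not offset > 0, to match redis
--             offset -= 1
--             continue
--         if count == 0:
--             break
--         count -= 1
--         out.append(item)
--     return out
-- ===== SOURCE B (Python) =====
-- from typing import List
--
-- def _limit_items(items: List[bytes], offset: int, count: int) -> List[bytes]: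
--     if offset < 0:
--         return []
--     if count < 0:
--         return items[offset:]
--     return items[offset:offset + count]
-- ===== Notes on version B (the rewrite author's own statement) =====
-- stated objective: simpler
-- what changed: Replaces the element-by-element skip/append loop with a closed-form slice after guarding the two sign cases (negative offset yields [], negative count means no limit).
import Mathlib
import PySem

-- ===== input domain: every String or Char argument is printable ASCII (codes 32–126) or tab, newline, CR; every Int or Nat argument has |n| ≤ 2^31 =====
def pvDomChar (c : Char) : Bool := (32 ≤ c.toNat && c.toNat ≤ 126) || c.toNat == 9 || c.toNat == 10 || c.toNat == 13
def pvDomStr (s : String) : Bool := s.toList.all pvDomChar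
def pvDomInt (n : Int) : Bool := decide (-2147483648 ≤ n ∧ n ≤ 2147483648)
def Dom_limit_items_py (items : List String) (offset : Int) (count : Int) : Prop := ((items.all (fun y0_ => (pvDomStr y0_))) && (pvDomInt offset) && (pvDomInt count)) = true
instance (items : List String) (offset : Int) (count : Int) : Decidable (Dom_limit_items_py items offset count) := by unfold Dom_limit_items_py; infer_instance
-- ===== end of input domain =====

-- ===== PORT A =====
-- A's loop: skip while offset is truthy (nonzero), then append until count hits 0 (negative count never hits 0)
def pvLimitLoop (items : List String) (offset : Int) (count : Int) : List String :=
  match items with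
  | [] => []
  | item :: rest =>
    if offset ≠ 0 then pvLimitLoop rest (offset - 1) count
    else if count = 0 then []
    else item :: pvLimitLoop rest offset (count - 1)

def limit_items_py (items : List String) (offset : Int) (count : Int) : List String :=
  pvLimitLoop items offset count

-- ===== PORT B =====
-- B: closed-form slice; negative offset gives [], negative count means "all remaining"
def limit_items_py_alt (items : List String) (offset : Int) (count : Int) : List String :=
  if offset < 0 then []
  else if count < 0 then PySem.List.slice items (some offset) none
  else PySem.List.slice items (some offset) (some (offset + count))

-- ===== PRECONDITION & SPEC =====
def Spec_limit_items_py (items : List String) (offset : Int) (count : Int) (out : List String) : Prop := out = limit_items_py_alt items offset count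
instance (items : List String) (offset : Int) (count : Int) (out : List String) : Decidable (Spec_limit_items_py items offset count out) := by unfold Spec_limit_items_py; infer_instance

-- ===== CLAIM (what is proved, stated in full; the proofs are below) =====
def Claim_equal_limit_items_py : Prop := ∀ (items : List String) (offset : Int) (count : Int), Dom_limit_items_py items offset count → Spec_limit_items_py items offset count (limit_items_py items offset count)

-- ===== LEMMAS AND PROOFS =====

-- A's loop with negative offset skips everything
theorem pvLimitLoop_neg (items : List String) (offset count : Int) (h : offset < 0) :
    pvLimitLoop items offset count = [] := by
  induction items generalizing offset with
  | nil => rfl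
  | cons x xs ih =>
    simp only [pvLimitLoop, if_pos (by omega : offset ≠ 0)]
    exact ih (offset - 1) (by omega)

-- A's loop with negative count takes everything after the skip
theorem pvLimitLoop_negCount (items : List String) (m : Nat) (count : Int) (h : count < 0) :
    pvLimitLoop items (m : Int) count = items.drop m := by
  induction items generalizing m count with
  | nil => simp [pvLimitLoop]
  | cons x xs ih =>
    match m with
    | 0 =>
      have hc : ¬ count = 0 := by omega
      simp only [Nat.cast_zero, pvLimitLoop, ne_eq, not_true_eq_false, if_false, if_neg hc]
      simpa using ih 0 (count - 1) (by omega)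
    | Nat.succ k =>
      have hk : ((k+1 : Nat) : Int) ≠ 0 := by omega
      simp only [pvLimitLoop, if_pos hk]
      have he : ((k+1 : Nat) : Int) - 1 = (k : Int) := by push_cast; ring
      rw [he, ih k count h]
      rfl

-- A's loop with nonnegative offset and count is drop-then-take
theorem pvLimitLoop_nonneg (items : List String) (m n : Nat) :
    pvLimitLoop items (m : Int) (n : Int) = (items.drop m).take n := by
  induction items generalizing m n with
  | nil => simp [pvLimitLoop]
  | cons x xs ih =>
    match m with
    | 0 =>
      match n with
      | 0 => rfl
      | Nat.succ j =>
        have hj : ((j+1 : Nat) : Int) ≠ 0 := by omega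
        simp only [Nat.cast_zero, pvLimitLoop, ne_eq, not_true_eq_false, if_false, if_neg hj]
        have he : ((j+1 : Nat) : Int) - 1 = (j : Int) := by push_cast; ring
        rw [he]
        simpa using ih 0 j
    | Nat.succ k =>
      have hk : ((k+1 : Nat) : Int) ≠ 0 := by omega
      simp only [pvLimitLoop, if_pos hk]
      have he : ((k+1 : Nat) : Int) - 1 = (k : Int) := by push_cast; ring
      rw [he, ih k n]
      rfl

-- ===== VERDICT (by name: the statement is the Claim_ definition above) =====
theorem limit_items_py_spec : Claim_equal_limit_items_py := by
  intro items offset count _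
  unfold Spec_limit_items_py limit_items_py limit_items_py_alt
  by_cases hoff : offset < 0
  · rw [if_pos hoff, pvLimitLoop_neg items offset count hoff]
  · rw [if_neg hoff]
    obtain ⟨m, rfl⟩ : ∃ m : Nat, offset = (m : Int) := ⟨offset.toNat, (Int.toNat_of_nonneg (by omega)).symm⟩
    by_cases hcnt : count < 0
    · rw [if_pos hcnt, pvLimitLoop_negCount items m count hcnt, PySem.List.slice_from_natCast]
    · rw [if_neg hcnt]
      obtain ⟨n, rfl⟩ : ∃ n : Nat, count = (n : Int) := ⟨count.toNat, (Int.toNat_of_nonneg (by omega)).symm⟩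
      rw [pvLimitLoop_nonneg items m n, PySem.List.slice_natCast_add]
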